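-- pv_equiv track=rewrite | github.com/pocketML/model-eval | src/statistics.py | reshape_data
-- ===== SOURCE A (Python) =====
-- SORT_ORDER_LANG = [
--     "am", "da", "en", "ar", "hi", "zh", "ru", "es", "tr", "vi"
-- ]
--
-- def reshape_data(data):
--     reshaped = []
--     for lang in SORT_ORDER_LANG:
--         lang_data = []
--         for model, model_data in data:
--             for lang_, data_dict in model_data:
--                 if lang_ == lang:
--                     lang_data.append((model, data_dict))
--         reshaped.append((lang, lang_data))
--     return reshaped
-- ===== SOURCE B (Python) =====
-- SORT_ORDER_LANG = [
--     "am", "da", "en", "ar", "hi", "zh", "ru", "es", "tr", "vi"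
-- ]
--
-- def reshape_data(data):
--     index = {}
--     for model, model_data in data:
--         for lang_, data_dict in model_data:
--             index.setdefault(lang_, []).append((model, data_dict))
--     return [(lang, index.get(lang, [])) for lang in SORT_ORDER_LANG]
-- ===== Notes on version B (the rewrite author's own statement) =====
-- stated objective: alternative
-- what changed: Replaces the per-language full rescan of data (one nested pass per entry of SORT_ORDER_LANG) with a single pass that groups entries into a dict keyed by language, then reads the groups off in SORT_ORDER_LANG order; measured runtime is comparable since L is a small constant.
import Mathlib
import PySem

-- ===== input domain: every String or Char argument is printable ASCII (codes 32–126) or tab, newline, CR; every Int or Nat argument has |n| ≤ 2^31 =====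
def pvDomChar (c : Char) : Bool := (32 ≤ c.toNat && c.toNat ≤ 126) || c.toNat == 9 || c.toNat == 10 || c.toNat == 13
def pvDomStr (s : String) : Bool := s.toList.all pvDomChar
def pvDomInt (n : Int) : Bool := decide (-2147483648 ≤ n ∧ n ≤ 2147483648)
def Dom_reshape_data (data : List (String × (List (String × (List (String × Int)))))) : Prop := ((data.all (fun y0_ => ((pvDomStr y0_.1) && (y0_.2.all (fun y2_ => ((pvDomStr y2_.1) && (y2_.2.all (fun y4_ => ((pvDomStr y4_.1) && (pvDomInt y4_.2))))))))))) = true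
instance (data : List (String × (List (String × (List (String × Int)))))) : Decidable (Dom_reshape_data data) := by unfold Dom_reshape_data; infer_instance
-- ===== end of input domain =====

-- B replaces A's per-language rescan of `data` (one full pass per language) by a single pass
-- building a dict language → collected list, then reads it off in SORT_ORDER_LANG order (objective: alternative single-pass grouping).

def sortOrderLang : List String :=
  ["am", "da", "en", "ar", "hi", "zh", "ru", "es", "tr", "vi"]

-- ===== PORT A =====
def reshape_data (data : List (String × (List (String × (List (String × Int)))))) : List (String × (List (String × (List (String × Int))))) :=
  sortOrderLang.foldl (fun reshaped lang =>
    reshaped ++ [(lang,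
      data.foldl (fun lang_data q =>
        q.2.foldl (fun lang_data p =>
          if p.1 == lang then lang_data ++ [(q.1, p.2)] else lang_data) lang_data) [])]) []

-- ===== PORT B =====
def reshape_data_alt (data : List (String × (List (String × (List (String × Int)))))) : List (String × (List (String × (List (String × Int))))) :=
  let index : PySem.Dict String (List (String × (List (String × Int)))) :=
    data.foldl (fun d q =>
      q.2.foldl (fun d p => d.modify p.1 [] (fun xs => xs ++ [(q.1, p.2)])) d)
      PySem.Dict.empty
  sortOrderLang.map (fun lang => (lang, index.getD lang []))

-- ===== PRECONDITION & SPEC =====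
def Spec_reshape_data (data : List (String × (List (String × (List (String × Int)))))) (out : List (String × (List (String × (List (String × Int)))))) : Prop := out = reshape_data_alt data
instance (data : List (String × (List (String × (List (String × Int)))))) (out : List (String × (List (String × (List (String × Int)))))) : Decidable (Spec_reshape_data data out) := by unfold Spec_reshape_data; infer_instance

-- ===== CLAIM (what is proved, stated in full; the proofs are below) =====
def Claim_equal_reshape_data : Prop := ∀ (data : List (String × (List (String × (List (String × Int)))))), Dom_reshape_data data → Spec_reshape_data data (reshape_data data)

-- ===== LEMMAS AND PROOFS =====

-- what both versions collect per language
def pvCollect (lang : String) (data : List (String × (List (String × (List (String × Int)))))) : List (String × (List (String × Int))) :=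
  data.flatMap (fun q => (q.2.filter (fun p => p.1 == lang)).map (fun p => (q.1, p.2)))

theorem pvA_inner_one (lang m : String) (md : List (String × (List (String × Int))))
    (acc : List (String × (List (String × Int)))) :
    md.foldl (fun ld p => if p.1 == lang then ld ++ [(m, p.2)] else ld) acc
      = acc ++ (md.filter (fun p => p.1 == lang)).map (fun p => (m, p.2)) := by
  induction md generalizing acc with
  | nil => simp
  | cons h t ih =>
    rw [List.foldl_cons]
    by_cases hc : (h.1 == lang) = true
    · rw [if_pos hc, ih]
      simp [hc]
    · rw [if_neg hc, ih]
      have hne : h.1 ≠ lang := by simpa using hc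
      simp [hne]

theorem pvA_inner (lang : String) (data : List (String × (List (String × (List (String × Int))))))
    (acc : List (String × (List (String × Int)))) :
    data.foldl (fun ld q =>
        q.2.foldl (fun ld p => if p.1 == lang then ld ++ [(q.1, p.2)] else ld) ld) acc
      = acc ++ pvCollect lang data := by
  induction data generalizing acc with
  | nil => simp [pvCollect]
  | cons h t ih =>
    rw [List.foldl_cons]
    show List.foldl _ (h.2.foldl (fun ld p => if p.1 == lang then ld ++ [(h.1, p.2)] else ld) acc) t = _
    rw [pvA_inner_one, ih]
    simp [pvCollect]

theorem pvB_inner_one (lang m : String) (md : List (String × (List (String × Int))))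
    (d : PySem.Dict String (List (String × (List (String × Int))))) :
    (md.foldl (fun d p => d.modify p.1 [] (fun xs => xs ++ [(m, p.2)])) d).getD lang []
      = d.getD lang [] ++ (md.filter (fun p => p.1 == lang)).map (fun p => (m, p.2)) := by
  induction md generalizing d with
  | nil => simp
  | cons h t ih =>
    rw [List.foldl_cons, ih, PySem.Dict.getD_modify]
    by_cases hc : h.1 = lang
    · subst hc
      simp
    · rw [if_neg (fun hh => hc hh.symm)]
      have hb : (h.1 == lang) = false := by simpa using hc
      simp [hb]

theorem pvB_inner (lang : String) (data : List (String × (List (String × (List (String × Int))))))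
    (d : PySem.Dict String (List (String × (List (String × Int))))) :
    (data.foldl (fun d q =>
        q.2.foldl (fun d p => d.modify p.1 [] (fun xs => xs ++ [(q.1, p.2)])) d) d).getD lang []
      = d.getD lang [] ++ pvCollect lang data := by
  induction data generalizing d with
  | nil => simp [pvCollect]
  | cons h t ih =>
    rw [List.foldl_cons]
    show (List.foldl _ (h.2.foldl (fun d p => d.modify p.1 [] (fun xs => xs ++ [(h.1, p.2)])) d) t).getD lang [] = _
    rw [ih, pvB_inner_one]
    simp [pvCollect]

theorem pvA_outer (langs : List String) (g : String → List (String × (List (String × Int))))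
    (acc : List (String × (List (String × (List (String × Int)))))) :
    langs.foldl (fun r lang => r ++ [(lang, g lang)]) acc
      = acc ++ langs.map (fun lang => (lang, g lang)) := by
  induction langs generalizing acc with
  | nil => simp
  | cons h t ih => simp [ih]

-- ===== VERDICT (by name: the statement is the Claim_ definition above) =====
theorem reshape_data_spec : Claim_equal_reshape_data := by
  intro data _
  show reshape_data data = reshape_data_alt data
  unfold reshape_data reshape_data_alt
  rw [pvA_outer]
  simp only [List.nil_append]
  refine List.map_congr_left (fun lang _ => ?_)
  rw [pvA_inner, pvB_inner]
  simp
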